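-- pv_equiv track=rewrite | github.com/Johnwang688/bible-app | scripts/load_summary.py | _canonical_place
-- ===== SOURCE A (Python) =====
-- def _canonical_place(label: str) -> str:
--     clean = " ".join((label or "").strip().split())
--     if not clean:
--         return ""
--     lower = clean.casefold()
--     if lower == "promised land":
--         return "Promised Land"
--     if lower.startswith("land of "):
--         return f"Land of {clean[8:].strip()}"
--     if lower.startswith("mount "):
--         return "Mount " + clean[6:].strip()
--     if lower.startswith("mt. "):
--         return "Mount " + clean[4:].strip()
--     if lower.startswith("sea of "):
--         return "Sea of " + clean[7:].strip()
--     if lower.startswith("river "):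
--         return "River " + clean[6:].strip()
--     return " ".join(part.capitalize() if part.lower() not in {"of", "the", "and"} else part.lower() for part in clean.split())
-- ===== SOURCE B (Python) =====
-- # Word-token dispatch: tokenize once, look the first word up in a dict of head-word
-- # rules, instead of normalizing to a string and scanning character prefixes.
--
-- _HEAD = {
--     "land": (1, "Land of"),
--     "mount": (0, "Mount"),
--     "mt.": (0, "Mount"),
--     "sea": (1, "Sea of"),
--     "river": (0, "River"),
-- }
--
-- _SMALL = {"of", "the", "and"}
--
--
-- def _fallback(words):
--     return " ".join(
--         w.lower() if w.lower() in _SMALL else w.capitalize() for w in words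
--     )
--
--
-- def _canonical_place(label: str) -> str:
--     words = (label or "").split()
--     if not words:
--         return ""
--     lw = [w.casefold() for w in words]
--     if lw == ["promised", "land"]:
--         return "Promised Land"
--     entry = _HEAD.get(lw[0])
--     if entry is not None:
--         skip, canon = entry
--         tail = 1 + skip
--         if len(words) > tail and lw[1:tail] == ["of"] * skip:
--             return canon + " " + " ".join(words[tail:])
--     return _fallback(words)
-- ===== Notes on version B (the rewrite author's own statement) =====
-- stated objective: alternative
-- what changed: B tokenizes the label into words once and dispatches on the first word via a dict of (words-to-skip, canonical head) rules, joining word lists, instead of A's normalize-to-string pass with five character-prefix startswith tests and string slicing.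
import Mathlib
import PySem

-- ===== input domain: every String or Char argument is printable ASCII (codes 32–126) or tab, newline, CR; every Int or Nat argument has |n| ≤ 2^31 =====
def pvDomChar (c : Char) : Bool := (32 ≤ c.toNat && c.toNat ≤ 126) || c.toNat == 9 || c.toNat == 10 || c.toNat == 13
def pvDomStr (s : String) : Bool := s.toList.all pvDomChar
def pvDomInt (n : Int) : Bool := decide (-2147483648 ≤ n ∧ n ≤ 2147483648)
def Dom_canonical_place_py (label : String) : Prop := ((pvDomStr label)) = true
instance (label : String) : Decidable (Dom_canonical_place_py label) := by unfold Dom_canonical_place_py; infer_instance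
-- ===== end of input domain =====

-- B tokenizes the label into words once and dispatches on the first word through a
-- dict of (words-to-skip, canonical head) rules, joining word lists; A normalizes to a
-- string and scans five character prefixes with slicing. Same output, different structure.

-- str.capitalize(): first char upper-cased, rest lower-cased (exact on the ASCII domain,
-- where Python's titlecase of the first char coincides with upper-case). Used by both ports.
def pvCapitalize (s : String) : String :=
  match s.toList with
  | [] => ""
  | c :: rest => String.ofList (PySem.Chars.upperChar c :: rest.map PySem.Chars.lowerChar)

-- the capitalize-each-word fallback, shared verbatim by both Pythons' final return
def pvFallback (words : List String) : String :=
  PySem.Str.join " " (words.map (fun w =>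
    if PySem.Str.lower w ∈ (["of", "the", "and"] : List String) then PySem.Str.lower w
    else pvCapitalize w))

-- ===== PORT A =====
-- casefold is ported as PySem.Str.lower: exact on the printable-ASCII domain.
def canonical_place_py (label : String) : String :=
  let clean := PySem.Str.join " " (PySem.Str.split₀ (PySem.Str.strip label))
  if clean = "" then ""
  else
    let lower := PySem.Str.lower clean
    if lower = "promised land" then "Promised Land"
    else if PySem.Str.startswith lower "land of " then
      "Land of " ++ PySem.Str.strip (PySem.Str.slice clean (some 8) none)
    else if PySem.Str.startswith lower "mount " then
      "Mount " ++ PySem.Str.strip (PySem.Str.slice clean (some 6) none)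
    else if PySem.Str.startswith lower "mt. " then
      "Mount " ++ PySem.Str.strip (PySem.Str.slice clean (some 4) none)
    else if PySem.Str.startswith lower "sea of " then
      "Sea of " ++ PySem.Str.strip (PySem.Str.slice clean (some 7) none)
    else if PySem.Str.startswith lower "river " then
      "River " ++ PySem.Str.strip (PySem.Str.slice clean (some 6) none)
    else
      pvFallback (PySem.Str.split₀ clean)

-- ===== PORT B =====
def pvHead : PySem.Dict String (Int × String) :=
  PySem.Dict.ofList
    [("land", ((1 : Int), "Land of")), ("mount", ((0 : Int), "Mount")),
     ("mt.", ((0 : Int), "Mount")), ("sea", ((1 : Int), "Sea of")),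
     ("river", ((0 : Int), "River"))]

def canonical_place_py_alt (label : String) : String :=
  let words := PySem.Str.split₀ label
  if words = [] then ""
  else
    let lw := words.map PySem.Str.lower
    if lw = ["promised", "land"] then "Promised Land"
    else
      -- lw[0]: indexing the head of words, nonempty here
      match PySem.Dict.get? pvHead (lw.headD "") with
      | some (skip, canon) =>
          let tail : Int := 1 + skip
          if (words.length : Int) > tail ∧
              PySem.List.slice lw (some 1) (some tail) = PySem.List.pyRepeat ["of"] skip then
            canon ++ " " ++ PySem.Str.join " " (PySem.List.slice words (some tail) none)
          else pvFallback words
      | none => pvFallback words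

-- ===== PRECONDITION & SPEC =====
def Spec_canonical_place_py (label : String) (out : String) : Prop := out = canonical_place_py_alt label
instance (label : String) (out : String) : Decidable (Spec_canonical_place_py label out) := by unfold Spec_canonical_place_py; infer_instance

-- ===== CLAIM (what is proved, stated in full; the proofs are below) =====
def Claim_equal_canonical_place_py : Prop := ∀ (label : String), Dom_canonical_place_py label → Spec_canonical_place_py label (canonical_place_py label)

-- ===== LEMMAS AND PROOFS =====

-- a word: nonempty and free of whitespace characters
def pvNS (w : List Char) : Prop := ∀ c ∈ w, PySem.Chars.isspace c = false
def pvWd (w : List Char) : Prop := w ≠ [] ∧ pvNS w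
-- the single-space join
def pvJ (ls : List (List Char)) : List Char := PySem.Chars.join [' '] ls

theorem go_allspace (t : List Char) (acc : List (List Char))
    (h : ∀ c ∈ t, PySem.Chars.isspace c = true) :
    PySem.Chars.split₀.go t [] acc = acc.reverse := by
  induction t with
  | nil => simp [PySem.Chars.split₀.go]
  | cons c t ih =>
      simp only [PySem.Chars.split₀.go, h c (by simp), List.isEmpty_nil, if_true]
      exact ih (fun c hc => h c (by simp [hc]))

theorem go_append_space (s t : List Char) (cur : List Char) (acc : List (List Char))
    (h : ∀ c ∈ t, PySem.Chars.isspace c = true) :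
    PySem.Chars.split₀.go (s ++ t) cur acc = PySem.Chars.split₀.go s cur acc := by
  induction s generalizing cur acc with
  | nil =>
      simp only [List.nil_append]
      cases t with
      | nil => rfl
      | cons c t =>
          have hc := h c (by simp)
          have ht : ∀ c ∈ t, PySem.Chars.isspace c = true := fun c hc => h c (by simp [hc])
          cases hcur : cur.isEmpty with
          | true =>
              simp only [PySem.Chars.split₀.go, hc, hcur, if_true]
              rw [go_allspace t acc ht]
          | false =>
              simp only [PySem.Chars.split₀.go, hc, hcur, if_true, Bool.false_eq_true, if_false]
              rw [go_allspace t _ ht]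
  | cons c s ih =>
      cases hsp : PySem.Chars.isspace c with
      | true =>
          simp only [List.cons_append, PySem.Chars.split₀.go, hsp, if_true]
          cases hcur : cur.isEmpty <;> simp [ih]
      | false =>
          simp only [List.cons_append, PySem.Chars.split₀.go, hsp, Bool.false_eq_true, if_false]
          exact ih _ _

theorem go_dropWhile (s : List Char) (acc : List (List Char)) :
    PySem.Chars.split₀.go (s.dropWhile PySem.Chars.isspace) [] acc
      = PySem.Chars.split₀.go s [] acc := by
  induction s with
  | nil => rfl
  | cons c s ih =>
      cases hsp : PySem.Chars.isspace c with
      | true => simp [hsp, PySem.Chars.split₀.go, ih]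
      | false => simp [hsp]

theorem split₀_strip (s : List Char) :
    PySem.Chars.split₀ (PySem.Chars.strip s) = PySem.Chars.split₀ s := by
  unfold PySem.Chars.split₀ PySem.Chars.strip PySem.Chars.rstrip PySem.Chars.lstrip
  have h1 : PySem.Chars.split₀.go
      ((List.dropWhile PySem.Chars.isspace (List.dropWhile PySem.Chars.isspace s).reverse).reverse)
      [] [] = PySem.Chars.split₀.go (List.dropWhile PySem.Chars.isspace s) [] [] := by
    set t := List.dropWhile PySem.Chars.isspace s with ht
    have hdecomp : t = (List.dropWhile PySem.Chars.isspace t.reverse).reverse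
        ++ (List.takeWhile PySem.Chars.isspace t.reverse).reverse := by
      have h := List.takeWhile_append_dropWhile (p := PySem.Chars.isspace) (l := t.reverse)
      conv_lhs => rw [← List.reverse_reverse t, ← h]
      rw [List.reverse_append]
    conv_rhs => rw [hdecomp]
    rw [go_append_space]
    intro c hc
    exact List.mem_takeWhile_imp (List.mem_reverse.mp hc)
  rw [h1, go_dropWhile]

theorem go_word (w rest cur : List Char) (acc : List (List Char)) (h : pvNS w) :
    PySem.Chars.split₀.go (w ++ rest) cur acc
      = PySem.Chars.split₀.go rest (w.reverse ++ cur) acc := by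
  induction w generalizing cur with
  | nil => simp
  | cons c w ih =>
      have hc : PySem.Chars.isspace c = false := h c (by simp)
      simp only [List.cons_append, PySem.Chars.split₀.go, hc, Bool.false_eq_true, if_false]
      rw [ih (c :: cur) (fun x hx => h x (by simp [hx]))]
      simp

theorem go_join (ls : List (List Char)) (acc : List (List Char)) (h : ∀ w ∈ ls, pvWd w) :
    PySem.Chars.split₀.go (pvJ ls) [] acc = acc.reverse ++ ls := by
  induction ls generalizing acc with
  | nil => simp [pvJ, PySem.Chars.join_nil, PySem.Chars.split₀.go]
  | cons w ls ih =>
      have hw := h w (by simp)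
      cases ls with
      | nil =>
          simp only [pvJ, PySem.Chars.join_singleton]
          rw [show w = w ++ [] by simp, go_word w [] [] acc hw.2]
          simp [PySem.Chars.split₀.go, List.isEmpty_iff, hw.1]
      | cons w2 ls2 =>
          have hJ : pvJ (w :: w2 :: ls2) = w ++ (' ' :: pvJ (w2 :: ls2)) := by
            simp [pvJ, PySem.Chars.join_cons_cons]
          rw [hJ, go_word _ _ _ _ hw.2]
          simp only [List.append_nil, PySem.Chars.split₀.go,
            show PySem.Chars.isspace ' ' = true from rfl, if_true]
          rw [if_neg (by simp [List.isEmpty_iff, hw.1])]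
          rw [ih (w.reverse.reverse :: acc) (fun x hx => h x (by simp [hx]))]
          simp

theorem split₀_join (ls : List (List Char)) (h : ∀ w ∈ ls, pvWd w) :
    PySem.Chars.split₀ (pvJ ls) = ls := by
  unfold PySem.Chars.split₀
  rw [go_join ls [] h]; rfl

theorem go_ok (s cur : List Char) (acc : List (List Char))
    (hcur : pvNS cur) (hacc : ∀ w ∈ acc, pvWd w) :
    ∀ w ∈ PySem.Chars.split₀.go s cur acc, pvWd w := by
  induction s generalizing cur acc with
  | nil =>
      intro w hw
      by_cases hc : cur.isEmpty = true
      · simp only [PySem.Chars.split₀.go] at hw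
        rw [if_pos hc, List.mem_reverse] at hw
        exact hacc w hw
      · simp only [PySem.Chars.split₀.go] at hw
        rw [if_neg hc, List.mem_reverse] at hw
        rcases List.mem_cons.mp hw with hw | hw
        · subst hw
          refine ⟨by simpa [List.isEmpty_iff] using hc, ?_⟩
          intro c hc'; exact hcur c (List.mem_reverse.mp hc')
        · exact hacc w hw
  | cons c s ih =>
      intro w hw
      cases hsp : PySem.Chars.isspace c with
      | true =>
          simp only [PySem.Chars.split₀.go, hsp, if_true] at hw
          by_cases hc : cur.isEmpty = true
          · rw [if_pos hc] at hw
            exact ih [] acc (by simp [pvNS]) hacc w hw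
          · rw [if_neg hc] at hw
            refine ih [] (cur.reverse :: acc) (by simp [pvNS]) ?_ w hw
            intro x hx
            rcases List.mem_cons.mp hx with hx | hx
            · subst hx
              refine ⟨by simpa [List.isEmpty_iff] using hc, ?_⟩
              intro c' hc'; exact hcur c' (List.mem_reverse.mp hc')
            · exact hacc x hx
      | false =>
          simp only [PySem.Chars.split₀.go, hsp, Bool.false_eq_true, if_false] at hw
          refine ih (c :: cur) acc ?_ hacc w hw
          intro c' hc'
          rcases List.mem_cons.mp hc' with hc' | hc'
          · subst hc'; exact hsp
          · exact hcur c' hc'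

theorem words_ok (s : List Char) : ∀ w ∈ PySem.Chars.split₀ s, pvWd w :=
  go_ok s [] [] (by simp [pvNS]) (by simp)

theorem isspace_lowerChar (c : Char) :
    PySem.Chars.isspace (PySem.Chars.lowerChar c) = PySem.Chars.isspace c := by
  unfold PySem.Chars.lowerChar
  by_cases h : PySem.Chars.isupper c = true
  · rw [if_pos h]
    unfold PySem.Chars.isupper at h
    simp only [Bool.and_eq_true, decide_eq_true_eq, Char.le_def] at h
    have h1 : 65 ≤ c.toNat := h.1
    have h2 : c.toNat ≤ 90 := h.2
    have hv : (c.toNat + 32).isValidChar := by left; omega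
    have ht : (Char.ofNat (c.toNat + 32)).toNat = c.toNat + 32 := by
      rw [Char.toNat_ofNat, if_pos hv]
    unfold PySem.Chars.isspace
    simp only [ht]
    rw [Bool.eq_iff_iff]
    simp only [Bool.or_eq_true, Bool.and_eq_true, decide_eq_true_eq]
    omega
  · rw [if_neg h]

theorem pvNS_lower (w : List Char) (h : pvNS w) : pvNS (PySem.Chars.lower w) := by
  intro c hc
  unfold PySem.Chars.lower at hc
  rcases List.mem_map.mp hc with ⟨d, hd, rfl⟩
  rw [isspace_lowerChar]
  exact h d hd

theorem pvWd_lower (w : List Char) (h : pvWd w) : pvWd (PySem.Chars.lower w) := by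
  refine ⟨?_, pvNS_lower w h.2⟩
  unfold PySem.Chars.lower
  simp [h.1]

theorem lower_join (ls : List (List Char)) :
    PySem.Chars.lower (pvJ ls) = pvJ (ls.map PySem.Chars.lower) := by
  induction ls with
  | nil => simp [pvJ, PySem.Chars.join_nil, PySem.Chars.lower]
  | cons w ls ih =>
      cases ls with
      | nil => simp [pvJ, PySem.Chars.join_singleton]
      | cons w2 ls2 =>
          simp only [List.map_cons, pvJ, PySem.Chars.join_cons_cons] at *
          simp only [PySem.Chars.lower, List.map_append] at *
          rw [ih]
          rfl

theorem word_prefix (p w t t' : List Char) (hp : pvNS p) (hw : pvNS w) :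
    (p ++ ' ' :: t) <+: (w ++ ' ' :: t') ↔ p = w ∧ t <+: t' := by
  induction p generalizing w with
  | nil =>
      cases w with
      | nil => simp [List.cons_prefix_cons]
      | cons c w' =>
          simp only [List.nil_append, List.cons_append, List.cons_prefix_cons]
          constructor
          · rintro ⟨rfl, -⟩
            have := hw ' ' (by simp)
            exact absurd this (by decide)
          · rintro ⟨h, -⟩; exact absurd h (by simp)
  | cons a p' ih =>
      cases w with
      | nil =>
          simp only [List.cons_append, List.nil_append, List.cons_prefix_cons]
          constructor
          · rintro ⟨rfl, -⟩
            have := hp ' ' (by simp)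
            exact absurd this (by decide)
          · rintro ⟨h, -⟩; exact absurd h (by simp)
      | cons c w' =>
          simp only [List.cons_append, List.cons_prefix_cons]
          rw [ih w' (fun x hx => hp x (by simp [hx])) (fun x hx => hw x (by simp [hx]))]
          constructor
          · rintro ⟨rfl, rfl, h⟩; exact ⟨rfl, h⟩
          · rintro ⟨h, ht⟩
            injection h with h1 h2
            exact ⟨h1, h2, ht⟩

theorem pref1 (p : List Char) (ls : List (List Char)) (hp : pvNS p)
    (hls : ∀ w ∈ ls, pvWd w) :
    (p ++ [' ']) <+: pvJ ls ↔ ∃ rest, rest ≠ [] ∧ ls = p :: rest := by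
  cases ls with
  | nil =>
      simp [pvJ, PySem.Chars.join_nil, List.prefix_nil]
  | cons w ls' =>
      cases ls' with
      | nil =>
          simp only [pvJ, PySem.Chars.join_singleton]
          constructor
          · intro h
            have hsp : ' ' ∈ w := h.subset (by simp)
            have := (hls w (by simp)).2 ' ' hsp
            exact absurd this (by decide)
          · rintro ⟨rest, hne, h⟩
            injection h with h1 h2
            exact absurd h2.symm hne
      | cons w2 ls2 =>
          have hJ : pvJ (w :: w2 :: ls2) = w ++ ' ' :: pvJ (w2 :: ls2) := by
            simp [pvJ, PySem.Chars.join_cons_cons]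
          rw [hJ, show p ++ [' '] = p ++ ' ' :: ([] : List Char) from rfl,
            word_prefix p w [] _ hp (hls w (by simp)).2]
          constructor
          · rintro ⟨rfl, -⟩; exact ⟨w2 :: ls2, by simp⟩
          · rintro ⟨rest, hne, h⟩
            injection h with h1 h2
            exact ⟨h1.symm, by simp⟩

theorem pref2 (p q : List Char) (ls : List (List Char)) (hp : pvNS p) (hq : pvNS q)
    (hls : ∀ w ∈ ls, pvWd w) :
    (p ++ ' ' :: (q ++ [' '])) <+: pvJ ls ↔ ∃ rest, rest ≠ [] ∧ ls = p :: q :: rest := by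
  cases ls with
  | nil =>
      simp [pvJ, PySem.Chars.join_nil, List.prefix_nil]
  | cons w ls' =>
      cases ls' with
      | nil =>
          simp only [pvJ, PySem.Chars.join_singleton]
          constructor
          · intro h
            have hsp : ' ' ∈ w := h.subset (by simp)
            have := (hls w (by simp)).2 ' ' hsp
            exact absurd this (by decide)
          · rintro ⟨rest, hne, h⟩
            simp at h
      | cons w2 ls2 =>
          have hJ : pvJ (w :: w2 :: ls2) = w ++ ' ' :: pvJ (w2 :: ls2) := by
            simp [pvJ, PySem.Chars.join_cons_cons]
          rw [hJ, word_prefix p w _ _ hp (hls w (by simp)).2,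
            pref1 q (w2 :: ls2) hq (fun x hx => hls x (by simp [hx]))]
          constructor
          · rintro ⟨rfl, rest, hne, heq⟩
            exact ⟨rest, hne, by rw [heq]⟩
          · rintro ⟨rest, hne, h⟩
            injection h with h1 h2
            exact ⟨h1.symm, rest, hne, h2⟩

theorem join_ne_nil (w : List Char) (ls : List (List Char)) (hw : w ≠ []) :
    pvJ (w :: ls) ≠ [] := by
  cases ls with
  | nil => simpa [pvJ, PySem.Chars.join_singleton] using hw
  | cons w2 ls2 =>
      simp only [pvJ, PySem.Chars.join_cons_cons]
      intro h
      rcases List.append_eq_nil_iff.mp h with ⟨h1, -⟩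
      rcases List.append_eq_nil_iff.mp h1 with ⟨h2, -⟩
      exact hw h2

theorem join_concat (ls : List (List Char)) (w : List Char) (h : ls ≠ []) :
    pvJ (ls ++ [w]) = pvJ ls ++ ' ' :: w := by
  induction ls with
  | nil => exact absurd rfl h
  | cons x ls ih =>
      cases ls with
      | nil =>
          simp [pvJ, PySem.Chars.join_cons_cons, PySem.Chars.join_singleton]
      | cons x2 ls2 =>
          have := ih (by simp)
          simp only [List.cons_append, pvJ, PySem.Chars.join_cons_cons] at *
          rw [this]
          simp

theorem strip_join (ls : List (List Char)) (hls : ∀ w ∈ ls, pvWd w) :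
    PySem.Chars.strip (pvJ ls) = pvJ ls := by
  unfold PySem.Chars.strip PySem.Chars.rstrip PySem.Chars.lstrip
  cases ls with
  | nil => simp [pvJ, PySem.Chars.join_nil]
  | cons w ls' =>
      have hw := hls w (by simp)
      have hfirst : ∃ r, pvJ (w :: ls') = w ++ r := by
        cases ls' with
        | nil => exact ⟨[], by simp [pvJ, PySem.Chars.join_singleton]⟩
        | cons w2 ls2 => exact ⟨' ' :: pvJ (w2 :: ls2), by simp [pvJ, PySem.Chars.join_cons_cons]⟩
      rcases hfirst with ⟨r, hr⟩
      have hl : List.dropWhile PySem.Chars.isspace (pvJ (w :: ls')) = pvJ (w :: ls') := by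
        rw [hr]
        cases w with
        | nil => exact absurd rfl hw.1
        | cons c w'' =>
            rw [List.cons_append, List.dropWhile_cons_of_neg (by simp [hw.2 c (by simp)])]
      rw [hl]
      rcases List.eq_nil_or_concat (w :: ls') with h | ⟨ls0, z, hz⟩
      · simp at h
      simp only [List.concat_eq_append] at hz
      have hzW := hls z (by rw [hz]; simp)
      rcases List.eq_nil_or_concat z with h0 | ⟨u, d, hd⟩
      · exact absurd h0 hzW.1
      simp only [List.concat_eq_append] at hd
      have hlast : ∃ r0, pvJ (w :: ls') = r0 ++ [d] := by
        cases ls0 with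
        | nil => exact ⟨u, by rw [hz]; simp [pvJ, PySem.Chars.join_singleton, hd]⟩
        | cons y ys =>
            refine ⟨pvJ (y :: ys) ++ ' ' :: u, ?_⟩
            rw [hz, join_concat (y :: ys) z (by simp), hd]
            simp
      rcases hlast with ⟨r0, hr0⟩
      rw [hr0]
      rw [List.reverse_append, List.reverse_singleton, List.singleton_append,
        List.dropWhile_cons_of_neg (by simp [hzW.2 d (by rw [hd]; simp)])]
      simp

theorem join1_decomp (P : List Char) (T : List (List Char)) (hT : T ≠ []) :
    pvJ (P :: T) = (P ++ [' ']) ++ pvJ T := by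
  cases T with
  | nil => exact absurd rfl hT
  | cons q T2 => simp [pvJ, PySem.Chars.join_cons_cons]

theorem join2_decomp (P q : List Char) (T2 : List (List Char)) (hT2 : T2 ≠ []) :
    pvJ (P :: q :: T2) = (P ++ ' ' :: (q ++ [' '])) ++ pvJ T2 := by
  rw [show pvJ (P :: q :: T2) = P ++ ' ' :: pvJ (q :: T2) by
    simp [pvJ, PySem.Chars.join_cons_cons], join1_decomp q T2 hT2]
  simp

theorem str_eq_of_toList {a b : String} (h : a.toList = b.toList) : a = b :=
  String.toList_injective h

theorem map_toList_inj {a b : List String}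
    (h : a.map String.toList = b.map String.toList) : a = b :=
  List.map_injective_iff.mpr (fun _ _ h' => String.toList_injective h') h

theorem slice_one_two {α : Type} (a b : α) (l : List α) :
    PySem.List.slice (a :: b :: l) (some 1) (some 2) = [b] := by
  simp [PySem.List.slice, PySem.List.clampIdx]

theorem slice_one_one {α : Type} (a : α) (l : List α) :
    PySem.List.slice (a :: l) (some 1) (some 1) = [] := by
  simp [PySem.List.slice, PySem.List.clampIdx]

theorem toList_map_lower (l : List String) :
    (l.map PySem.Str.lower).map String.toList = (l.map String.toList).map PySem.Chars.lower := by
  simp [List.map_map, Function.comp_def, PySem.Str.toList_lower]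

theorem val1 (w0 : String) (wr : List String) (hwr : wr ≠ [])
    (hWdT : ∀ w ∈ wr.map String.toList, pvWd w) (off : Int) (h0 : 0 ≤ off)
    (hoff : off.toNat = w0.toList.length + 1) :
    (PySem.Str.strip (PySem.Str.slice (PySem.Str.join " " (w0 :: wr)) (some off) none)).toList
      = pvJ (wr.map String.toList) := by
  rw [PySem.Str.toList_strip]
  have hsl : (PySem.Str.slice (PySem.Str.join " " (w0 :: wr)) (some off) none).toList
      = PySem.List.slice (PySem.Str.join " " (w0 :: wr)).toList (some off) none := by simp
  rw [hsl, PySem.List.slice_from _ h0, PySem.Str.toList_join]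
  have hJ : PySem.Chars.join " ".toList (List.map String.toList (w0 :: wr))
      = pvJ (w0.toList :: wr.map String.toList) := rfl
  rw [hJ, join1_decomp _ _ (by simpa using hwr),
    show off.toNat = (w0.toList ++ [' ']).length by simp [hoff], List.drop_left,
    strip_join _ hWdT]

theorem val2 (w0 w1 : String) (wr2 : List String) (hwr2 : wr2 ≠ [])
    (hWdT2 : ∀ w ∈ wr2.map String.toList, pvWd w) (off : Int) (h0 : 0 ≤ off)
    (hoff : off.toNat = w0.toList.length + w1.toList.length + 2) :
    (PySem.Str.strip (PySem.Str.slice (PySem.Str.join " " (w0 :: w1 :: wr2)) (some off) none)).toList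
      = pvJ (wr2.map String.toList) := by
  rw [PySem.Str.toList_strip]
  have hsl : (PySem.Str.slice (PySem.Str.join " " (w0 :: w1 :: wr2)) (some off) none).toList
      = PySem.List.slice (PySem.Str.join " " (w0 :: w1 :: wr2)).toList (some off) none := by simp
  rw [hsl, PySem.List.slice_from _ h0, PySem.Str.toList_join]
  have hJ : PySem.Chars.join " ".toList (List.map String.toList (w0 :: w1 :: wr2))
      = pvJ (w0.toList :: w1.toList :: wr2.map String.toList) := rfl
  rw [hJ, join2_decomp _ _ _ (by simpa using hwr2),
    show off.toNat = (w0.toList ++ ' ' :: (w1.toList ++ [' '])).length by simp [hoff]; omega,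
    List.drop_left, strip_join _ hWdT2]

theorem pvHead_get?_none (h : String) (h1 : h ≠ "land") (h2 : h ≠ "mount")
    (h3 : h ≠ "mt.") (h4 : h ≠ "sea") (h5 : h ≠ "river") :
    PySem.Dict.get? pvHead h = none := by
  have hitems : pvHead.items = [("land", ((1 : Int), "Land of")), ("mount", ((0 : Int), "Mount")),
      ("mt.", ((0 : Int), "Mount")), ("sea", ((1 : Int), "Sea of")), ("river", ((0 : Int), "River"))] := by
    decide
  unfold PySem.Dict.get?
  rw [hitems]
  have b1 : ("land" == h) = false := beq_eq_false_iff_ne.mpr (Ne.symm h1)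
  have b2 : ("mount" == h) = false := beq_eq_false_iff_ne.mpr (Ne.symm h2)
  have b3 : ("mt." == h) = false := beq_eq_false_iff_ne.mpr (Ne.symm h3)
  have b4 : ("sea" == h) = false := beq_eq_false_iff_ne.mpr (Ne.symm h4)
  have b5 : ("river" == h) = false := beq_eq_false_iff_ne.mpr (Ne.symm h5)
  simp [List.find?, b1, b2, b3, b4, b5]

theorem pvNS_dec1 : pvNS "land".toList := by
  rw [show "land".toList = ['l','a','n','d'] from rfl]
  intro c hc; fin_cases hc <;> decide
theorem pvNS_dec2 : pvNS "of".toList := by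
  rw [show "of".toList = ['o','f'] from rfl]
  intro c hc; fin_cases hc <;> decide

-- the workhorse: both ports agree on every label
set_option maxHeartbeats 2000000 in
set_option maxRecDepth 8192 in
theorem ports_eq (label : String) : canonical_place_py label = canonical_place_py_alt label := by
  have hsplitA : PySem.Str.split₀ (PySem.Str.strip label) = PySem.Str.split₀ label := by
    show List.map String.ofList _ = List.map String.ofList _
    rw [PySem.Str.toList_strip, split₀_strip]
  unfold canonical_place_py canonical_place_py_alt
  rw [hsplitA]
  cases hcase : PySem.Str.split₀ label with
  | nil => rfl
  | cons w0 wr =>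
    dsimp only
    have hWdL : ∀ w ∈ List.map String.toList (w0 :: wr), pvWd w := by
      rw [← hcase, PySem.Str.split₀_map_toList]; exact words_ok _
    have hWd0 : pvWd w0.toList := hWdL _ (by simp)
    have hWdT : ∀ w ∈ wr.map String.toList, pvWd w := fun w hw => hWdL w (by simp [hw])
    have hclean : (PySem.Str.join " " (w0 :: wr)).toList
        = pvJ (w0.toList :: wr.map String.toList) := by
      rw [PySem.Str.toList_join]; rfl
    have hclean_ne : ¬ (PySem.Str.join " " (w0 :: wr) = "") := by
      intro h
      have h' := congrArg String.toList h
      rw [hclean] at h'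
      exact join_ne_nil _ _ hWd0.1 (by simpa using h')
    rw [if_neg hclean_ne, if_neg (by simp : ¬ (w0 :: wr = ([] : List String)))]
    have hlow : (PySem.Str.lower (PySem.Str.join " " (w0 :: wr))).toList
        = pvJ (PySem.Chars.lower w0.toList :: (wr.map String.toList).map PySem.Chars.lower) := by
      rw [PySem.Str.toList_lower, hclean, lower_join]; rfl
    have hWdLL : ∀ w ∈ (PySem.Chars.lower w0.toList ::
        (wr.map String.toList).map PySem.Chars.lower), pvWd w := by
      intro w hw
      rcases List.mem_cons.mp hw with rfl | hw
      · exact pvWd_lower _ hWd0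
      · rcases List.mem_map.mp hw with ⟨x, hx, rfl⟩
        exact pvWd_lower _ (hWdT x hx)
    simp only [List.map_cons, List.headD_cons]
    -- promised land
    by_cases hP : PySem.Str.lower (PySem.Str.join " " (w0 :: wr)) = "promised land"
    · rw [if_pos hP]
      have h1 : pvJ (PySem.Chars.lower w0.toList ::
          (wr.map String.toList).map PySem.Chars.lower) = "promised land".toList := by
        rw [← hlow, hP]
      have h2 : (PySem.Chars.lower w0.toList :: (wr.map String.toList).map PySem.Chars.lower)
          = ["promised".toList, "land".toList] := by
        have h3 := congrArg PySem.Chars.split₀ h1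
        rw [split₀_join _ hWdLL] at h3
        rw [h3, show PySem.Chars.split₀ ("promised land".toList)
          = ["promised".toList, "land".toList] from rfl]
      have hlw : PySem.Str.lower w0 :: wr.map PySem.Str.lower = ["promised", "land"] := by
        apply map_toList_inj
        have := toList_map_lower (w0 :: wr)
        simp only [List.map_cons] at this ⊢
        rw [this, h2]
        rfl
      rw [if_pos hlw]
    · have hlwne : ¬ (PySem.Str.lower w0 :: wr.map PySem.Str.lower = ["promised", "land"]) := by
        intro hh
        apply hP
        apply str_eq_of_toList
        rw [hlow]
        have hh' := congrArg (List.map String.toList) hh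
        have hmap := toList_map_lower (w0 :: wr)
        simp only [List.map_cons] at hh' hmap
        rw [hmap] at hh'
        rw [hh']
        rfl
      rw [if_neg hP, if_neg hlwne]
      -- land of
      by_cases hL : PySem.Str.startswith
          (PySem.Str.lower (PySem.Str.join " " (w0 :: wr))) "land of " = true
      · rw [if_pos hL]
        have hpre : ("land".toList ++ ' ' :: ("of".toList ++ [' '])) <+:
            pvJ (PySem.Chars.lower w0.toList :: (wr.map String.toList).map PySem.Chars.lower) := by
          rw [PySem.Str.startswith_eq] at hL
          have h2 := (PySem.Chars.startswith_iff _ _).mp hL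
          rw [hlow] at h2
          exact (show "land of ".toList
            = "land".toList ++ ' ' :: ("of".toList ++ [' ']) from rfl) ▸ h2
        obtain ⟨rest, hrne, hLLeq⟩ :=
          (pref2 "land".toList "of".toList _ pvNS_dec1 pvNS_dec2 hWdLL).mp hpre
        rw [show "land".toList = ['l','a','n','d'] from rfl, show "of".toList = ['o','f'] from rfl,
          List.cons_eq_cons] at hLLeq
        obtain ⟨e1, e2⟩ := hLLeq
        cases wr with
        | nil => simp at e2
        | cons w1 wr2 =>
          simp only [List.map_cons] at e2
          rw [List.cons_eq_cons] at e2
          obtain ⟨f1, f2⟩ := e2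
          have hwr2ne : wr2 ≠ [] := by
            intro hh; subst hh; simp only [List.map_nil] at f2; exact hrne f2.symm
          have hpos : 0 < wr2.length := List.length_pos_of_ne_nil hwr2ne
          have hlen0 : w0.toList.length = 4 := by
            have := congrArg List.length e1; simpa [PySem.Chars.lower] using this
          have hlen1 : w1.toList.length = 2 := by
            have := congrArg List.length f1; simpa [PySem.Chars.lower] using this
          have hl0 : PySem.Str.lower w0 = "land" :=
            str_eq_of_toList (by rw [PySem.Str.toList_lower, e1]; exact rfl)
          have hl1 : PySem.Str.lower w1 = "of" :=
            str_eq_of_toList (by rw [PySem.Str.toList_lower, f1]; exact rfl)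
          rw [hl0, show PySem.Dict.get? pvHead "land"
            = some ((1 : Int), "Land of") from rfl]
          dsimp only
          have hg1 : (((w0 :: w1 :: wr2).length : Nat) : Int) > 1 + 1 := by
            simp only [List.length_cons]; push_cast; omega
          have hg2 : PySem.List.slice ("land" :: (w1 :: wr2).map PySem.Str.lower)
              (some 1) (some (1 + 1)) = PySem.List.pyRepeat ["of"] 1 := by
            simp only [List.map_cons]
            rw [show ((1 : Int) + 1) = 2 from by norm_num, slice_one_two, hl1]
            rfl
          rw [if_pos ⟨hg1, hg2⟩]
          apply str_eq_of_toList
          rw [String.toList_append, String.toList_append, String.toList_append]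
          rw [val2 w0 w1 wr2 hwr2ne
            (fun w hw => hWdT w (by simp only [List.map_cons]; exact List.mem_cons_of_mem _ hw))
            8 (by norm_num) (by rw [hlen0, hlen1]; rfl)]
          rw [show ((1 : Int) + 1) = 2 from by norm_num,
            PySem.List.slice_from _ (by norm_num : (0 : Int) ≤ 2),
            show ((2 : Int)).toNat = 2 from rfl]
          simp only [List.drop_succ_cons, List.drop_zero]
          rw [PySem.Str.toList_join,
            show "Land of".toList ++ " ".toList = "Land of ".toList from rfl]
          rfl
      · rw [if_neg hL]
        -- mount
        by_cases hM : PySem.Str.startswith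
            (PySem.Str.lower (PySem.Str.join " " (w0 :: wr))) "mount " = true
        · rw [if_pos hM]
          have hpre : ("mount".toList ++ [' ']) <+:
              pvJ (PySem.Chars.lower w0.toList :: (wr.map String.toList).map PySem.Chars.lower) := by
            rw [PySem.Str.startswith_eq] at hM
            have h2 := (PySem.Chars.startswith_iff _ _).mp hM
            rw [hlow] at h2
            exact (show "mount ".toList = "mount".toList ++ [' '] from rfl) ▸ h2
          obtain ⟨rest, hrne, hLLeq⟩ :=
            (pref1 "mount".toList _ (by rw [show "mount".toList = ['m','o','u','n','t'] from rfl]; intro c hc; fin_cases hc <;> decide) hWdLL).mp hpre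
          rw [show "mount".toList = ['m','o','u','n','t'] from rfl, List.cons_eq_cons] at hLLeq
          obtain ⟨e1, e2⟩ := hLLeq
          cases wr with
          | nil => simp only [List.map_nil] at e2; exact absurd e2.symm hrne
          | cons w1 wr2 =>
            have hlen0 : w0.toList.length = 5 := by
              have := congrArg List.length e1; simpa [PySem.Chars.lower] using this
            have hl0 : PySem.Str.lower w0 = "mount" :=
              str_eq_of_toList (by rw [PySem.Str.toList_lower, e1]; exact rfl)
            rw [hl0, show PySem.Dict.get? pvHead "mount"
              = some ((0 : Int), "Mount") from rfl]
            dsimp only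
            have hg1 : (((w0 :: w1 :: wr2).length : Nat) : Int) > 1 + 0 := by
              simp only [List.length_cons]; push_cast; omega
            have hg2 : PySem.List.slice ("mount" :: (w1 :: wr2).map PySem.Str.lower)
                (some 1) (some (1 + 0)) = PySem.List.pyRepeat ["of"] 0 := by
              rw [show ((1 : Int) + 0) = 1 from by norm_num, slice_one_one]
              rfl
            rw [if_pos ⟨hg1, hg2⟩]
            apply str_eq_of_toList
            rw [String.toList_append, String.toList_append, String.toList_append]
            rw [val1 w0 (w1 :: wr2) (by simp) hWdT 6 (by norm_num) (by rw [hlen0]; rfl)]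
            rw [show ((1 : Int) + 0) = 1 from by norm_num,
              PySem.List.slice_from _ (by norm_num : (0 : Int) ≤ 1),
              show ((1 : Int)).toNat = 1 from rfl]
            simp only [List.drop_succ_cons, List.drop_zero]
            rw [PySem.Str.toList_join,
              show "Mount".toList ++ " ".toList = "Mount ".toList from rfl]
            rfl
        · rw [if_neg hM]
          -- mt.
          by_cases hT3 : PySem.Str.startswith
              (PySem.Str.lower (PySem.Str.join " " (w0 :: wr))) "mt. " = true
          · rw [if_pos hT3]
            have hpre : ("mt.".toList ++ [' ']) <+:
                pvJ (PySem.Chars.lower w0.toList :: (wr.map String.toList).map PySem.Chars.lower) := by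
              rw [PySem.Str.startswith_eq] at hT3
              have h2 := (PySem.Chars.startswith_iff _ _).mp hT3
              rw [hlow] at h2
              exact (show "mt. ".toList = "mt.".toList ++ [' '] from rfl) ▸ h2
            obtain ⟨rest, hrne, hLLeq⟩ :=
              (pref1 "mt.".toList _ (by rw [show "mt.".toList = ['m','t','.'] from rfl]; intro c hc; fin_cases hc <;> decide) hWdLL).mp hpre
            rw [show "mt.".toList = ['m','t','.'] from rfl, List.cons_eq_cons] at hLLeq
            obtain ⟨e1, e2⟩ := hLLeq
            cases wr with
            | nil => simp only [List.map_nil] at e2; exact absurd e2.symm hrne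
            | cons w1 wr2 =>
              have hlen0 : w0.toList.length = 3 := by
                have := congrArg List.length e1; simpa [PySem.Chars.lower] using this
              have hl0 : PySem.Str.lower w0 = "mt." :=
                str_eq_of_toList (by rw [PySem.Str.toList_lower, e1]; exact rfl)
              rw [hl0, show PySem.Dict.get? pvHead "mt."
                = some ((0 : Int), "Mount") from rfl]
              dsimp only
              have hg1 : (((w0 :: w1 :: wr2).length : Nat) : Int) > 1 + 0 := by
                simp only [List.length_cons]; push_cast; omega
              have hg2 : PySem.List.slice ("mt." :: (w1 :: wr2).map PySem.Str.lower)
                  (some 1) (some (1 + 0)) = PySem.List.pyRepeat ["of"] 0 := by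
                rw [show ((1 : Int) + 0) = 1 from by norm_num, slice_one_one]
                rfl
              rw [if_pos ⟨hg1, hg2⟩]
              apply str_eq_of_toList
              rw [String.toList_append, String.toList_append, String.toList_append]
              rw [val1 w0 (w1 :: wr2) (by simp) hWdT 4 (by norm_num) (by rw [hlen0]; rfl)]
              rw [show ((1 : Int) + 0) = 1 from by norm_num,
                PySem.List.slice_from _ (by norm_num : (0 : Int) ≤ 1),
                show ((1 : Int)).toNat = 1 from rfl]
              simp only [List.drop_succ_cons, List.drop_zero]
              rw [PySem.Str.toList_join,
                show "Mount".toList ++ " ".toList = "Mount ".toList from rfl]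
              rfl
          · rw [if_neg hT3]
            -- sea of
            by_cases hS : PySem.Str.startswith
                (PySem.Str.lower (PySem.Str.join " " (w0 :: wr))) "sea of " = true
            · rw [if_pos hS]
              have hpre : ("sea".toList ++ ' ' :: ("of".toList ++ [' '])) <+:
                  pvJ (PySem.Chars.lower w0.toList :: (wr.map String.toList).map PySem.Chars.lower) := by
                rw [PySem.Str.startswith_eq] at hS
                have h2 := (PySem.Chars.startswith_iff _ _).mp hS
                rw [hlow] at h2
                exact (show "sea of ".toList
                  = "sea".toList ++ ' ' :: ("of".toList ++ [' ']) from rfl) ▸ h2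
              obtain ⟨rest, hrne, hLLeq⟩ :=
                (pref2 "sea".toList "of".toList _ (by rw [show "sea".toList = ['s','e','a'] from rfl]; intro c hc; fin_cases hc <;> decide) pvNS_dec2 hWdLL).mp hpre
              rw [show "sea".toList = ['s','e','a'] from rfl, show "of".toList = ['o','f'] from rfl,
                List.cons_eq_cons] at hLLeq
              obtain ⟨e1, e2⟩ := hLLeq
              cases wr with
              | nil => simp at e2
              | cons w1 wr2 =>
                simp only [List.map_cons] at e2
                rw [List.cons_eq_cons] at e2
                obtain ⟨f1, f2⟩ := e2
                have hwr2ne : wr2 ≠ [] := by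
                  intro hh; subst hh; simp only [List.map_nil] at f2; exact hrne f2.symm
                have hpos : 0 < wr2.length := List.length_pos_of_ne_nil hwr2ne
                have hlen0 : w0.toList.length = 3 := by
                  have := congrArg List.length e1; simpa [PySem.Chars.lower] using this
                have hlen1 : w1.toList.length = 2 := by
                  have := congrArg List.length f1; simpa [PySem.Chars.lower] using this
                have hl0 : PySem.Str.lower w0 = "sea" :=
                  str_eq_of_toList (by rw [PySem.Str.toList_lower, e1]; exact rfl)
                have hl1 : PySem.Str.lower w1 = "of" :=
                  str_eq_of_toList (by rw [PySem.Str.toList_lower, f1]; exact rfl)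
                rw [hl0, show PySem.Dict.get? pvHead "sea"
                  = some ((1 : Int), "Sea of") from rfl]
                dsimp only
                have hg1 : (((w0 :: w1 :: wr2).length : Nat) : Int) > 1 + 1 := by
                  simp only [List.length_cons]; push_cast; omega
                have hg2 : PySem.List.slice ("sea" :: (w1 :: wr2).map PySem.Str.lower)
                    (some 1) (some (1 + 1)) = PySem.List.pyRepeat ["of"] 1 := by
                  simp only [List.map_cons]
                  rw [show ((1 : Int) + 1) = 2 from by norm_num, slice_one_two, hl1]
                  rfl
                rw [if_pos ⟨hg1, hg2⟩]
                apply str_eq_of_toList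
                rw [String.toList_append, String.toList_append, String.toList_append]
                rw [val2 w0 w1 wr2 hwr2ne
                  (fun w hw => hWdT w (by simp only [List.map_cons]; exact List.mem_cons_of_mem _ hw))
                  7 (by norm_num) (by rw [hlen0, hlen1]; rfl)]
                rw [show ((1 : Int) + 1) = 2 from by norm_num,
                  PySem.List.slice_from _ (by norm_num : (0 : Int) ≤ 2),
                  show ((2 : Int)).toNat = 2 from rfl]
                simp only [List.drop_succ_cons, List.drop_zero]
                rw [PySem.Str.toList_join,
                  show "Sea of".toList ++ " ".toList = "Sea of ".toList from rfl]
                rfl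
            · rw [if_neg hS]
              -- river
              by_cases hR : PySem.Str.startswith
                  (PySem.Str.lower (PySem.Str.join " " (w0 :: wr))) "river " = true
              · rw [if_pos hR]
                have hpre : ("river".toList ++ [' ']) <+:
                    pvJ (PySem.Chars.lower w0.toList :: (wr.map String.toList).map PySem.Chars.lower) := by
                  rw [PySem.Str.startswith_eq] at hR
                  have h2 := (PySem.Chars.startswith_iff _ _).mp hR
                  rw [hlow] at h2
                  exact (show "river ".toList = "river".toList ++ [' '] from rfl) ▸ h2
                obtain ⟨rest, hrne, hLLeq⟩ :=
                  (pref1 "river".toList _ (by rw [show "river".toList = ['r','i','v','e','r'] from rfl]; intro c hc; fin_cases hc <;> decide) hWdLL).mp hpre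
                rw [show "river".toList = ['r','i','v','e','r'] from rfl, List.cons_eq_cons] at hLLeq
                obtain ⟨e1, e2⟩ := hLLeq
                cases wr with
                | nil => simp only [List.map_nil] at e2; exact absurd e2.symm hrne
                | cons w1 wr2 =>
                  have hlen0 : w0.toList.length = 5 := by
                    have := congrArg List.length e1; simpa [PySem.Chars.lower] using this
                  have hl0 : PySem.Str.lower w0 = "river" :=
                    str_eq_of_toList (by rw [PySem.Str.toList_lower, e1]; exact rfl)
                  rw [hl0, show PySem.Dict.get? pvHead "river"
                    = some ((0 : Int), "River") from rfl]
                  dsimp only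
                  have hg1 : (((w0 :: w1 :: wr2).length : Nat) : Int) > 1 + 0 := by
                    simp only [List.length_cons]; push_cast; omega
                  have hg2 : PySem.List.slice ("river" :: (w1 :: wr2).map PySem.Str.lower)
                      (some 1) (some (1 + 0)) = PySem.List.pyRepeat ["of"] 0 := by
                    rw [show ((1 : Int) + 0) = 1 from by norm_num, slice_one_one]
                    rfl
                  rw [if_pos ⟨hg1, hg2⟩]
                  apply str_eq_of_toList
                  rw [String.toList_append, String.toList_append, String.toList_append]
                  rw [val1 w0 (w1 :: wr2) (by simp) hWdT 6 (by norm_num) (by rw [hlen0]; rfl)]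
                  rw [show ((1 : Int) + 0) = 1 from by norm_num,
                    PySem.List.slice_from _ (by norm_num : (0 : Int) ≤ 1),
                    show ((1 : Int)).toNat = 1 from rfl]
                  simp only [List.drop_succ_cons, List.drop_zero]
                  rw [PySem.Str.toList_join,
                    show "River".toList ++ " ".toList = "River ".toList from rfl]
                  rfl
              · rw [if_neg hR]
                -- fallback on both sides
                have hsplit_clean : PySem.Str.split₀ (PySem.Str.join " " (w0 :: wr)) = w0 :: wr := by
                  show List.map String.ofList
                    (PySem.Chars.split₀ (PySem.Str.join " " (w0 :: wr)).toList) = w0 :: wr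
                  rw [hclean, split₀_join _ (by simpa using hWdL)]
                  simp [List.map_map, Function.comp_def, String.ofList_toList]
                rw [hsplit_clean]
                -- B: every rule either misses or its guard fails
                by_cases k1 : PySem.Str.lower w0 = "land"
                · rw [k1, show PySem.Dict.get? pvHead "land"
                    = some ((1 : Int), "Land of") from rfl]
                  dsimp only
                  rw [if_neg ?_]
                  rintro ⟨hg1, hg2⟩
                  cases wr with
                  | nil => simp only [List.length_cons, List.length_nil] at hg1; omega
                  | cons w1 wr2 =>
                    rw [show ((1 : Int) + 1) = 2 from by norm_num] at hg2
                    simp only [List.map_cons] at hg2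
                    rw [slice_one_two] at hg2
                    have hl1 : PySem.Str.lower w1 = "of" := by
                      have := hg2; simp only [PySem.List.pyRepeat] at this
                      simpa using this
                    have hwr2 : wr2 ≠ [] := by
                      intro hh; subst hh
                      simp only [List.length_cons, List.length_nil] at hg1; omega
                    apply hL
                    rw [PySem.Str.startswith_eq]
                    apply (PySem.Chars.startswith_iff _ _).mpr
                    rw [hlow]
                    rw [show "land of ".toList
                      = "land".toList ++ ' ' :: ("of".toList ++ [' ']) from rfl]
                    apply (pref2 "land".toList "of".toList _ pvNS_dec1 pvNS_dec2 hWdLL).mpr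
                    refine ⟨(wr2.map String.toList).map PySem.Chars.lower, by simpa using hwr2, ?_⟩
                    have e1 : PySem.Chars.lower w0.toList = "land".toList := by
                      have := congrArg String.toList k1; rwa [PySem.Str.toList_lower] at this
                    have e2 : PySem.Chars.lower w1.toList = "of".toList := by
                      have := congrArg String.toList hl1; rwa [PySem.Str.toList_lower] at this
                    simp only [List.map_cons]
                    rw [e1, e2]
                · by_cases k2 : PySem.Str.lower w0 = "mount"
                  · rw [k2, show PySem.Dict.get? pvHead "mount"
                      = some ((0 : Int), "Mount") from rfl]
                    dsimp only
                    rw [if_neg ?_]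
                    rintro ⟨hg1, -⟩
                    cases wr with
                    | nil => simp only [List.length_cons, List.length_nil] at hg1; omega
                    | cons w1 wr2 =>
                      apply hM
                      rw [PySem.Str.startswith_eq]
                      apply (PySem.Chars.startswith_iff _ _).mpr
                      rw [hlow]
                      rw [show "mount ".toList = "mount".toList ++ [' '] from rfl]
                      apply (pref1 "mount".toList _ (by rw [show "mount".toList = ['m','o','u','n','t'] from rfl]; intro c hc; fin_cases hc <;> decide) hWdLL).mpr
                      refine ⟨((w1 :: wr2).map String.toList).map PySem.Chars.lower, by simp, ?_⟩
                      have e1 : PySem.Chars.lower w0.toList = "mount".toList := by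
                        have := congrArg String.toList k2; rwa [PySem.Str.toList_lower] at this
                      rw [e1]
                  · by_cases k3 : PySem.Str.lower w0 = "mt."
                    · rw [k3, show PySem.Dict.get? pvHead "mt."
                        = some ((0 : Int), "Mount") from rfl]
                      dsimp only
                      rw [if_neg ?_]
                      rintro ⟨hg1, -⟩
                      cases wr with
                      | nil => simp only [List.length_cons, List.length_nil] at hg1; omega
                      | cons w1 wr2 =>
                        apply hT3
                        rw [PySem.Str.startswith_eq]
                        apply (PySem.Chars.startswith_iff _ _).mpr
                        rw [hlow]
                        rw [show "mt. ".toList = "mt.".toList ++ [' '] from rfl]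
                        apply (pref1 "mt.".toList _ (by rw [show "mt.".toList = ['m','t','.'] from rfl]; intro c hc; fin_cases hc <;> decide) hWdLL).mpr
                        refine ⟨((w1 :: wr2).map String.toList).map PySem.Chars.lower, by simp, ?_⟩
                        have e1 : PySem.Chars.lower w0.toList = "mt.".toList := by
                          have := congrArg String.toList k3; rwa [PySem.Str.toList_lower] at this
                        rw [e1]
                    · by_cases k4 : PySem.Str.lower w0 = "sea"
                      · rw [k4, show PySem.Dict.get? pvHead "sea"
                          = some ((1 : Int), "Sea of") from rfl]
                        dsimp only
                        rw [if_neg ?_]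
                        rintro ⟨hg1, hg2⟩
                        cases wr with
                        | nil => simp only [List.length_cons, List.length_nil] at hg1; omega
                        | cons w1 wr2 =>
                          rw [show ((1 : Int) + 1) = 2 from by norm_num] at hg2
                          simp only [List.map_cons] at hg2
                          rw [slice_one_two] at hg2
                          have hl1 : PySem.Str.lower w1 = "of" := by
                            have := hg2; simp only [PySem.List.pyRepeat] at this
                            simpa using this
                          have hwr2 : wr2 ≠ [] := by
                            intro hh; subst hh
                            simp only [List.length_cons, List.length_nil] at hg1; omega
                          apply hS
                          rw [PySem.Str.startswith_eq]
                          apply (PySem.Chars.startswith_iff _ _).mpr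
                          rw [hlow]
                          rw [show "sea of ".toList
                            = "sea".toList ++ ' ' :: ("of".toList ++ [' ']) from rfl]
                          apply (pref2 "sea".toList "of".toList _ (by rw [show "sea".toList = ['s','e','a'] from rfl]; intro c hc; fin_cases hc <;> decide) pvNS_dec2 hWdLL).mpr
                          refine ⟨(wr2.map String.toList).map PySem.Chars.lower, by simpa using hwr2, ?_⟩
                          have e1 : PySem.Chars.lower w0.toList = "sea".toList := by
                            have := congrArg String.toList k4; rwa [PySem.Str.toList_lower] at this
                          have e2 : PySem.Chars.lower w1.toList = "of".toList := by
                            have := congrArg String.toList hl1; rwa [PySem.Str.toList_lower] at this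
                          simp only [List.map_cons]
                          rw [e1, e2]
                      · by_cases k5 : PySem.Str.lower w0 = "river"
                        · rw [k5, show PySem.Dict.get? pvHead "river"
                            = some ((0 : Int), "River") from rfl]
                          dsimp only
                          rw [if_neg ?_]
                          rintro ⟨hg1, -⟩
                          cases wr with
                          | nil => simp only [List.length_cons, List.length_nil] at hg1; omega
                          | cons w1 wr2 =>
                            apply hR
                            rw [PySem.Str.startswith_eq]
                            apply (PySem.Chars.startswith_iff _ _).mpr
                            rw [hlow]
                            rw [show "river ".toList = "river".toList ++ [' '] from rfl]
                            apply (pref1 "river".toList _ (by rw [show "river".toList = ['r','i','v','e','r'] from rfl]; intro c hc; fin_cases hc <;> decide) hWdLL).mpr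
                            refine ⟨((w1 :: wr2).map String.toList).map PySem.Chars.lower, by simp, ?_⟩
                            have e1 : PySem.Chars.lower w0.toList = "river".toList := by
                              have := congrArg String.toList k5; rwa [PySem.Str.toList_lower] at this
                            rw [e1]
                        · rw [pvHead_get?_none _ k1 k2 k3 k4 k5]

-- ===== VERDICT (by name: the statement is the Claim_ definition above) =====
theorem canonical_place_py_spec : Claim_equal_canonical_place_py := by
  intro label _
  exact ports_eq label
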